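-- pv_equiv track=rewrite | github.com/zxgcqupt/NASA_Project | hybrid_model_gpu.py | risk_quantification
-- ===== SOURCE A (Python) =====
-- rate_five = ['General Declared Emergency', 'General Physical Injury / Incapacitation', 'Flight Crew Inflight Shutdown',
--              'Air Traffic Control Separated Traffic', 'Aircraft Aircraft Damaged']
--
-- rate_four = ['General Evacuated', 'Flight Crew Regained Aircraft Control',
--               'Air Traffic Control Issued Advisory / Alert', 'Flight Crew Landed in Emergency Condition',
--               'Flight Crew Landed In Emergency Condition']
--
-- rate_three = ['General Work Refused', 'Flight Crew Became Reoriented', 'Flight Crew Diverted',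
--              'Flight Crew Executed Go Around / Missed Approach',
--              'Flight Crew Overcame Equipment Problem', 'Flight Crew Rejected Takeoff', 'Flight Crew Took Evasive Action',
--              'Air Traffic Control Issued New Clearance']
--
-- rate_two = ['General Maintenance Action', 'General Flight Cancelled / Delayed',
--               'General Release Refused / Aircraft Not Accepted',
--               'Flight Crew Overrode Automation', 'Flight Crew FLC Overrode Automation',
--               'Flight Crew Exited Penetrated Airspace',
--               'Flight Crew Requested ATC Assistance / Clarification', 'Flight Crew Landed As Precaution',
--               'Flight Crew Returned To Clearance', 'Flight Crew Returned To Departure Airport',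
--               'Aircraft Automation Overrode Flight Crew']
--
-- rate_one = ['General Police / Security Involved', 'Flight Crew Returned To Gate', 'Aircraft Equipment Problem Dissipated',
--             'unknown', 'Air Traffic Control Provided Assistance',
--             'General None Reported / Taken', 'Flight Crew FLC complied w / Automation / Advisory']
--
-- def risk_quantification(val):
--     event_risk = []
--     for i in range(len(val)):
--         item = val[i].lstrip() ## remove the space at the start of each item
--         if item in rate_five:
--             event_risk.append(5)
--         elif item in rate_four:
--             event_risk.append(4)
--         elif item in rate_three:
--             event_risk.append(3)
--         elif item in rate_two:
--             event_risk.append(2)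
--         elif item in rate_one:
--             event_risk.append(1)
--     return max(event_risk)
-- ===== SOURCE B (Python) =====
-- rate_five = ['General Declared Emergency', 'General Physical Injury / Incapacitation', 'Flight Crew Inflight Shutdown',
--              'Air Traffic Control Separated Traffic', 'Aircraft Aircraft Damaged']
--
-- rate_four = ['General Evacuated', 'Flight Crew Regained Aircraft Control',
--               'Air Traffic Control Issued Advisory / Alert', 'Flight Crew Landed in Emergency Condition',
--               'Flight Crew Landed In Emergency Condition']
--
-- rate_three = ['General Work Refused', 'Flight Crew Became Reoriented', 'Flight Crew Diverted',
--              'Flight Crew Executed Go Around / Missed Approach',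
--              'Flight Crew Overcame Equipment Problem', 'Flight Crew Rejected Takeoff', 'Flight Crew Took Evasive Action',
--              'Air Traffic Control Issued New Clearance']
--
-- rate_two = ['General Maintenance Action', 'General Flight Cancelled / Delayed',
--               'General Release Refused / Aircraft Not Accepted',
--               'Flight Crew Overrode Automation', 'Flight Crew FLC Overrode Automation',
--               'Flight Crew Exited Penetrated Airspace',
--               'Flight Crew Requested ATC Assistance / Clarification', 'Flight Crew Landed As Precaution',
--               'Flight Crew Returned To Clearance', 'Flight Crew Returned To Departure Airport',
--               'Aircraft Automation Overrode Flight Crew']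
--
-- rate_one = ['General Police / Security Involved', 'Flight Crew Returned To Gate', 'Aircraft Equipment Problem Dissipated',
--             'unknown', 'Air Traffic Control Provided Assistance',
--             'General None Reported / Taken', 'Flight Crew FLC complied w / Automation / Advisory']
--
-- _LEVELS = [(5, frozenset(rate_five)), (4, frozenset(rate_four)), (3, frozenset(rate_three)),
--            (2, frozenset(rate_two)), (1, frozenset(rate_one))]
--
-- def risk_quantification(val):
--     stripped = [item.lstrip() for item in val]
--     for level, names in _LEVELS:
--         if any(item in names for item in stripped):
--             return level
--     raise ValueError("no recognized event in input")
-- ===== Notes on version B (the rewrite author's own statement) =====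
-- stated objective: alternative
-- what changed: Inverts the loop nesting: instead of mapping each item to a rating, collecting a list and taking max() at the end, B scans the risk levels 5..1 in descending order with precomputed sets and returns the first level any stripped item belongs to (highest-present wins, short-circuiting).
-- outside the precondition, e.g. on risk_quantification([]): A raises ValueError, B raises ValueError; on risk_quantification(['no recognized event']): A raises ValueError, B raises ValueError
import Mathlib
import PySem

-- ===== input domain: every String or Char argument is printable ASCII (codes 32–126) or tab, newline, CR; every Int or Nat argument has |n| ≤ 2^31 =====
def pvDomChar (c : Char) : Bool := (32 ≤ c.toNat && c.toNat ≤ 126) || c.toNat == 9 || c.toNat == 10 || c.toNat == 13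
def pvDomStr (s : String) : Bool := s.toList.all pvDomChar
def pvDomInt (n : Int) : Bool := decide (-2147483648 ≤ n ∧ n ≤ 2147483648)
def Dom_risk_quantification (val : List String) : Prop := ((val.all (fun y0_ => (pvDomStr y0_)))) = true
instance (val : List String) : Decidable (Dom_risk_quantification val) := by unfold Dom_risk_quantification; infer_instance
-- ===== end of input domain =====

-- B inverts the loop nesting: instead of rating every item and taking max() of the collected
-- list, it scans risk levels 5..1 in descending order and returns the first level present
-- (objective: alternative decomposition, same cost).

-- module constants
def rateFive : List String := ["General Declared Emergency", "General Physical Injury / Incapacitation", "Flight Crew Inflight Shutdown",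
  "Air Traffic Control Separated Traffic", "Aircraft Aircraft Damaged"]
def rateFour : List String := ["General Evacuated", "Flight Crew Regained Aircraft Control",
  "Air Traffic Control Issued Advisory / Alert", "Flight Crew Landed in Emergency Condition",
  "Flight Crew Landed In Emergency Condition"]
def rateThree : List String := ["General Work Refused", "Flight Crew Became Reoriented", "Flight Crew Diverted",
  "Flight Crew Executed Go Around / Missed Approach",
  "Flight Crew Overcame Equipment Problem", "Flight Crew Rejected Takeoff", "Flight Crew Took Evasive Action",
  "Air Traffic Control Issued New Clearance"]
def rateTwo : List String := ["General Maintenance Action", "General Flight Cancelled / Delayed",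
  "General Release Refused / Aircraft Not Accepted",
  "Flight Crew Overrode Automation", "Flight Crew FLC Overrode Automation",
  "Flight Crew Exited Penetrated Airspace",
  "Flight Crew Requested ATC Assistance / Clarification", "Flight Crew Landed As Precaution",
  "Flight Crew Returned To Clearance", "Flight Crew Returned To Departure Airport",
  "Aircraft Automation Overrode Flight Crew"]
def rateOne : List String := ["General Police / Security Involved", "Flight Crew Returned To Gate", "Aircraft Equipment Problem Dissipated",
  "unknown", "Air Traffic Control Provided Assistance",
  "General None Reported / Taken", "Flight Crew FLC complied w / Automation / Advisory"]

-- ===== PORT A =====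
-- for i in range(len(val)): item = val[i].lstrip(); if-chain appends rating; return max(event_risk)
-- (max([]) raises ValueError in Python: excluded by Pre_; the .getD 0 default is never used inside Pre_)
def risk_quantification (val : List String) : Int :=
  let event_risk : List Int :=
    (PySem.List.pyRange 0 (val.length : Int) 1).foldl (fun acc i =>
      let item := PySem.Str.lstrip (PySem.List.pyGetD val i "")
      if item ∈ rateFive then acc ++ [5]
      else if item ∈ rateFour then acc ++ [4]
      else if item ∈ rateThree then acc ++ [3]
      else if item ∈ rateTwo then acc ++ [2]
      else if item ∈ rateOne then acc ++ [1]
      else acc) []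
  (PySem.List.max? event_risk (fun x => x)).getD 0

-- ===== PORT B =====
-- B: stripped = [item.lstrip() for item in val]; for level, names in LEVELS: if any(... in names): return level
-- (the fall-through 0 corresponds to B's raise ValueError, outside Pre_)
def pvLevels : List (Int × List String) :=
  [(5, rateFive), (4, rateFour), (3, rateThree), (2, rateTwo), (1, rateOne)]

def pvScan (stripped : List String) : List (Int × List String) → Int
  | [] => 0
  | (level, names) :: rest =>
      if stripped.any (fun t => decide (t ∈ names)) then level else pvScan stripped rest

def risk_quantification_alt (val : List String) : Int :=
  pvScan (val.map (fun s => PySem.Str.lstrip s)) pvLevels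

-- ===== PRECONDITION & SPEC =====
-- Pre_ excludes exactly the inputs on which A's max([]) raises ValueError (no item, after
-- lstrip, is in any of the five rating lists); B also raises ValueError there.
def Pre_risk_quantification (val : List String) : Prop :=
  ∃ s ∈ val, PySem.Str.lstrip s ∈ (rateFive ++ rateFour ++ rateThree ++ rateTwo ++ rateOne)
instance (val : List String) : Decidable (Pre_risk_quantification val) := by
  unfold Pre_risk_quantification; infer_instance
def pvWitness_risk_quantification : List String := ["  unknown", "Flight Crew Diverted"]

def Spec_risk_quantification (val : List String) (out : Int) : Prop := out = risk_quantification_alt val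
instance (val : List String) (out : Int) : Decidable (Spec_risk_quantification val out) := by unfold Spec_risk_quantification; infer_instance

-- ===== CLAIM (what is proved, stated in full; the proofs are below) =====
def Claim_equal_risk_quantification : Prop := ∀ (val : List String), Dom_risk_quantification val → Pre_risk_quantification val → Spec_risk_quantification val (risk_quantification val)

-- ===== LEMMAS AND PROOFS =====

-- the per-item rating A's if-chain computes, as an Option (none = item unrated)
def pvROpt (s : String) : Option Int :=
  if PySem.Str.lstrip s ∈ rateFive then some 5
  else if PySem.Str.lstrip s ∈ rateFour then some 4
  else if PySem.Str.lstrip s ∈ rateThree then some 3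
  else if PySem.Str.lstrip s ∈ rateTwo then some 2
  else if PySem.Str.lstrip s ∈ rateOne then some 1
  else none

lemma pvROpt_bounds {s : String} {y : Int} (h : pvROpt s = some y) : 1 ≤ y ∧ y ≤ 5 := by
  unfold pvROpt at h; split_ifs at h <;> simp_all <;> omega

lemma pvROpt_five {s : String} (h : pvROpt s = some 5) : PySem.Str.lstrip s ∈ rateFive := by
  unfold pvROpt at h; split_ifs at h <;> simp_all
lemma pvROpt_four {s : String} (h : pvROpt s = some 4) : PySem.Str.lstrip s ∈ rateFour := by
  unfold pvROpt at h; split_ifs at h <;> simp_all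
lemma pvROpt_three {s : String} (h : pvROpt s = some 3) : PySem.Str.lstrip s ∈ rateThree := by
  unfold pvROpt at h; split_ifs at h <;> simp_all
lemma pvROpt_two {s : String} (h : pvROpt s = some 2) : PySem.Str.lstrip s ∈ rateTwo := by
  unfold pvROpt at h; split_ifs at h <;> simp_all

lemma pvROpt_of_five {s : String} (h : PySem.Str.lstrip s ∈ rateFive) : pvROpt s = some 5 := by
  unfold pvROpt; simp [h]
lemma pvROpt_of_four {s : String} (h5 : PySem.Str.lstrip s ∉ rateFive)
    (h : PySem.Str.lstrip s ∈ rateFour) : pvROpt s = some 4 := by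
  unfold pvROpt; simp [h5, h]
lemma pvROpt_of_three {s : String} (h5 : PySem.Str.lstrip s ∉ rateFive)
    (h4 : PySem.Str.lstrip s ∉ rateFour) (h : PySem.Str.lstrip s ∈ rateThree) :
    pvROpt s = some 3 := by
  unfold pvROpt; simp [h5, h4, h]
lemma pvROpt_of_two {s : String} (h5 : PySem.Str.lstrip s ∉ rateFive)
    (h4 : PySem.Str.lstrip s ∉ rateFour) (h3 : PySem.Str.lstrip s ∉ rateThree)
    (h : PySem.Str.lstrip s ∈ rateTwo) : pvROpt s = some 2 := by
  unfold pvROpt; simp [h5, h4, h3, h]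
-- A's loop accumulates exactly the rated items, in order
lemma pvFoldA (val : List String) (acc : List Int) :
    val.foldl (fun acc s =>
      let item := PySem.Str.lstrip s
      if item ∈ rateFive then acc ++ [5]
      else if item ∈ rateFour then acc ++ [4]
      else if item ∈ rateThree then acc ++ [3]
      else if item ∈ rateTwo then acc ++ [2]
      else if item ∈ rateOne then acc ++ [1]
      else acc) acc = acc ++ val.filterMap pvROpt := by
  induction val generalizing acc with
  | nil => simp
  | cons s rest ih =>
    simp only [List.foldl_cons, List.filterMap_cons, pvROpt]
    split_ifs <;> simp_all <;> rfl

lemma pvAny_iff (val X : List String) :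
    ((val.map (fun s => PySem.Str.lstrip s)).any (fun t => decide (t ∈ X)) = true) ↔
      ∃ s ∈ val, PySem.Str.lstrip s ∈ X := by
  simp [List.any_map, List.any_eq_true]

lemma pvA_eq_filterMap (val : List String) :
    risk_quantification val =
      (PySem.List.max? (val.filterMap pvROpt) (fun x => x)).getD 0 := by
  unfold risk_quantification
  rw [PySem.List.foldl_pyRange_zero_pyGetD' val ""
    (fun acc s =>
      let item := PySem.Str.lstrip s
      if item ∈ rateFive then acc ++ [5]
      else if item ∈ rateFour then acc ++ [4]
      else if item ∈ rateThree then acc ++ [3]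
      else if item ∈ rateTwo then acc ++ [2]
      else if item ∈ rateOne then acc ++ [1]
      else acc) []]
  rw [show (List.foldl (fun acc s =>
      let item := PySem.Str.lstrip s
      if item ∈ rateFive then acc ++ [5]
      else if item ∈ rateFour then acc ++ [4]
      else if item ∈ rateThree then acc ++ [3]
      else if item ∈ rateTwo then acc ++ [2]
      else if item ∈ rateOne then acc ++ [1]
      else acc) [] val) = [] ++ val.filterMap pvROpt from pvFoldA val []]
  simp

theorem risk_quantification_spec : Claim_equal_risk_quantification := by
  intro val _ hpre
  unfold Spec_risk_quantification
  rw [pvA_eq_filterMap]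
  -- the collected list is nonempty
  have hne : val.filterMap pvROpt ≠ [] := by
    obtain ⟨s, hs, hmem⟩ := hpre
    intro hnil
    have h := (List.filterMap_eq_nil_iff.mp hnil) s hs
    unfold pvROpt at h
    split_ifs at h ; simp_all
  obtain ⟨m, hm⟩ : ∃ m, PySem.List.max? (val.filterMap pvROpt) (fun x => x) = some m := by
    cases h : PySem.List.max? (val.filterMap pvROpt) (fun x => x) with
    | none => exact absurd (by rwa [PySem.List.max?_eq_none_iff] at h) hne
    | some m => exact ⟨m, rfl⟩
  have hmemL : m ∈ val.filterMap pvROpt := PySem.List.max?_mem hm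
  have hmax : ∀ y ∈ val.filterMap pvROpt, y ≤ m := fun y hy => PySem.List.max?_isMax hm y hy
  obtain ⟨sm, hsm, hrm⟩ := List.mem_filterMap.mp hmemL
  rw [hm]
  simp only [Option.getD_some]
  -- case analysis on the highest level present
  unfold risk_quantification_alt pvScan pvLevels
  simp only [pvScan]
  by_cases h5 : ∃ s ∈ val, PySem.Str.lstrip s ∈ rateFive
  · obtain ⟨s, hs, hmem⟩ := h5
    have hb : m ≤ 5 := (pvROpt_bounds hrm).2
    have h5' : (5 : Int) ∈ val.filterMap pvROpt :=
      List.mem_filterMap.mpr ⟨s, hs, pvROpt_of_five hmem⟩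
    have := hmax 5 h5'
    rw [if_pos ((pvAny_iff val rateFive).mpr ⟨s, hs, hmem⟩)]
    omega
  · rw [if_neg (by rw [pvAny_iff]; exact h5)]
    have hm5 : m ≠ 5 := fun he => h5 ⟨sm, hsm, pvROpt_five (he ▸ hrm)⟩
    by_cases h4 : ∃ s ∈ val, PySem.Str.lstrip s ∈ rateFour
    · obtain ⟨s, hs, hmem⟩ := h4
      have hb : m ≤ 5 := (pvROpt_bounds hrm).2
      have h4' : (4 : Int) ∈ val.filterMap pvROpt :=
        List.mem_filterMap.mpr ⟨s, hs,
          pvROpt_of_four (fun hc => h5 ⟨s, hs, hc⟩) hmem⟩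
      have := hmax 4 h4'
      rw [if_pos ((pvAny_iff val rateFour).mpr ⟨s, hs, hmem⟩)]
      omega
    · rw [if_neg (by rw [pvAny_iff]; exact h4)]
      have hm4 : m ≠ 4 := fun he => h4 ⟨sm, hsm, pvROpt_four (he ▸ hrm)⟩
      by_cases h3 : ∃ s ∈ val, PySem.Str.lstrip s ∈ rateThree
      · obtain ⟨s, hs, hmem⟩ := h3
        have hb : m ≤ 5 := (pvROpt_bounds hrm).2
        have h3' : (3 : Int) ∈ val.filterMap pvROpt :=
          List.mem_filterMap.mpr ⟨s, hs,
            pvROpt_of_three (fun hc => h5 ⟨s, hs, hc⟩) (fun hc => h4 ⟨s, hs, hc⟩) hmem⟩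
        have := hmax 3 h3'
        rw [if_pos ((pvAny_iff val rateThree).mpr ⟨s, hs, hmem⟩)]
        omega
      · rw [if_neg (by rw [pvAny_iff]; exact h3)]
        have hm3 : m ≠ 3 := fun he => h3 ⟨sm, hsm, pvROpt_three (he ▸ hrm)⟩
        by_cases h2 : ∃ s ∈ val, PySem.Str.lstrip s ∈ rateTwo
        · obtain ⟨s, hs, hmem⟩ := h2
          have hb : m ≤ 5 := (pvROpt_bounds hrm).2
          have h2' : (2 : Int) ∈ val.filterMap pvROpt :=
            List.mem_filterMap.mpr ⟨s, hs,
              pvROpt_of_two (fun hc => h5 ⟨s, hs, hc⟩) (fun hc => h4 ⟨s, hs, hc⟩)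
                (fun hc => h3 ⟨s, hs, hc⟩) hmem⟩
          have := hmax 2 h2'
          rw [if_pos ((pvAny_iff val rateTwo).mpr ⟨s, hs, hmem⟩)]
          omega
        · rw [if_neg (by rw [pvAny_iff]; exact h2)]
          have hm2 : m ≠ 2 := fun he => h2 ⟨sm, hsm, pvROpt_two (he ▸ hrm)⟩
          by_cases h1 : ∃ s ∈ val, PySem.Str.lstrip s ∈ rateOne
          · obtain ⟨s, hs, hmem⟩ := h1
            have hb : 1 ≤ m ∧ m ≤ 5 := pvROpt_bounds hrm
            rw [if_pos ((pvAny_iff val rateOne).mpr ⟨s, hs, hmem⟩)]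
            omega
          · exfalso
            obtain ⟨s, hs, hmem⟩ := hpre
            simp only [List.mem_append] at hmem
            rcases hmem with (((h | h) | h) | h) | h
            · exact h5 ⟨s, hs, h⟩
            · exact h4 ⟨s, hs, h⟩
            · exact h3 ⟨s, hs, h⟩
            · exact h2 ⟨s, hs, h⟩
            · exact h1 ⟨s, hs, h⟩
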